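-- pv_equiv track=rewrite | github.com/Lee-Siyoung/Algorithm-study | 이시영/133499_pg.py | solution
-- ===== SOURCE A (Python) =====
-- def solution(babbling):
--     answer = 0
--     for i in babbling:
--         a=''
--         b=''
--         for j in range(len(i)):
--             a+=i[j]
--             if a in ["aya", "ye", "woo", "ma"] and a != b:
--                 b=a
--                 a=''
--         if len(a) == 0:
--             answer+=1
--
--     return answer
-- ===== SOURCE B (Python) =====
-- def solution(babbling):
--     tokens = ["aya", "ye", "woo", "ma"]
--
--     def ok(s):
--         prev = ""
--         while s != "":
--             for t in tokens:
--                 if s.startswith(t) and t != prev: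
--                     s, prev = s[len(t):], t
--                     break
--             else:
--                 return False
--         return True
--
--     return sum(1 for s in babbling if ok(s))
-- ===== Notes on version B (the rewrite author's own statement) =====
-- stated objective: alternative
-- what changed: Replaced A's character-by-character accumulator with consecutive-repeat bookkeeping by a token-level parser that strips one allowed token (different from the previous one) off the front of the string per step; the count is a sum over the list.
import Mathlib
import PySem

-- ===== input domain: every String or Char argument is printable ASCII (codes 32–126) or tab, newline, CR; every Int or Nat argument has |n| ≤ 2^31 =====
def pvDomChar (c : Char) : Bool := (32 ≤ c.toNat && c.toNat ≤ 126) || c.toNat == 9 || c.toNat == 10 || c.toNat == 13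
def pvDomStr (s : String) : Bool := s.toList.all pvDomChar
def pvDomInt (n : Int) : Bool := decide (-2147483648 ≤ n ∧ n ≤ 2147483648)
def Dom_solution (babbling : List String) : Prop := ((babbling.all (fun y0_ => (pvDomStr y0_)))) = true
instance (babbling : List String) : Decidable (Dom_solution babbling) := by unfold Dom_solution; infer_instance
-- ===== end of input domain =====

-- B replaces A's character-by-character accumulator with a token-level
-- parser (strip one allowed token ≠ previous from the front each step); objective: alternative.

-- ===== PORT A =====
-- Strings are handled as their character lists (PySem convention); the state
-- (a, b) and the membership test mirror A's inner loop step for step.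
def pvTokens : List (List Char) := [['a','y','a'], ['y','e'], ['w','o','o'], ['m','a']]

def pvStepA (st : List Char × List Char) (c : Char) : List Char × List Char :=
  let a := st.1 ++ [c]
  if a ∈ pvTokens ∧ a ≠ st.2 then ([], a) else (a, st.2)

def solution (babbling : List String) : Int :=
  babbling.foldl
    (fun answer i =>
      let st := i.toList.foldl pvStepA ([], [])
      if st.1.length = 0 then answer + 1 else answer)
    0

-- ===== PORT B =====
-- transliteration of Source B's `ok` loop (state s, prev): try each token in order; startswith → drop it.
def pvOk (s prev : List Char) : Bool :=
  if s = [] then true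
  else if ['a','y','a'].isPrefixOf s && ['a','y','a'] != prev then pvOk (s.drop 3) ['a','y','a']
  else if ['y','e'].isPrefixOf s && ['y','e'] != prev then pvOk (s.drop 2) ['y','e']
  else if ['w','o','o'].isPrefixOf s && ['w','o','o'] != prev then pvOk (s.drop 3) ['w','o','o']
  else if ['m','a'].isPrefixOf s && ['m','a'] != prev then pvOk (s.drop 2) ['m','a']
  else false
termination_by s.length
decreasing_by
  all_goals cases s with
  | nil => simp_all
  | cons c cs => simp

def solution_alt (babbling : List String) : Int :=
  (babbling.map (fun s => if pvOk s.toList [] then (1 : Int) else 0)).sum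

-- ===== PRECONDITION & SPEC =====
def Spec_solution (babbling : List String) (out : Int) : Prop := out = solution_alt babbling
instance (babbling : List String) (out : Int) : Decidable (Spec_solution babbling out) := by unfold Spec_solution; infer_instance

-- ===== CLAIM (what is proved, stated in full; the proofs are below) =====
def Claim_equal_solution : Prop := ∀ (babbling : List String), Dom_solution babbling → Spec_solution babbling (solution babbling)

-- ===== LEMMAS AND PROOFS =====

-- a state whose accumulator is no prefix of any token never empties again
lemma pv_dead : ∀ (cs a b : List Char), a ≠ [] → (∀ t ∈ pvTokens, ¬ a <+: t) →
    (List.foldl pvStepA (a, b) cs).1 ≠ [] := by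
  intro cs
  induction cs with
  | nil => intro a b ha _; simpa using ha
  | cons c cs ih =>
    intro a b ha hpre
    have hnot : ¬ ((a ++ [c]) ∈ pvTokens ∧ (a ++ [c]) ≠ b) := by
      rintro ⟨hm, -⟩
      exact hpre _ hm ⟨[c], rfl⟩
    simp only [List.foldl_cons, pvStepA, if_neg hnot]
    exact ih (a ++ [c]) b (by simp) (fun t ht hp => hpre t ht ((List.prefix_append a [c]).trans hp))

-- a token extended by any character is no prefix of any token
lemma pv_tok_ext (a : List Char) (ha : a ∈ pvTokens) (c : Char) :
    ∀ t ∈ pvTokens, ¬ (a ++ [c]) <+: t := by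
  intro t ht
  fin_cases ha <;> fin_cases ht <;> simp [List.cons_prefix_cons]

-- from a state (t, t) with t a token, the accumulator never empties again
lemma pv_blocked (cs a : List Char) (ha : a ∈ pvTokens) :
    (List.foldl pvStepA (a, a) cs).1 ≠ [] := by
  have hane : a ≠ [] := by fin_cases ha <;> simp
  cases cs with
  | nil => simpa using hane
  | cons c cs =>
    have hnot : ¬ ((a ++ [c]) ∈ pvTokens ∧ (a ++ [c]) ≠ a) := by
      rintro ⟨hm, -⟩
      exact pv_tok_ext a ha c _ hm (List.prefix_refl _)
    simp only [List.foldl_cons, pvStepA, if_neg hnot]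
    exact pv_dead cs (a ++ [c]) a (by simp) (pv_tok_ext a ha c)

lemma pv_np1 (c : Char) (h1 : c ≠ 'a') (h2 : c ≠ 'y') (h3 : c ≠ 'w') (h4 : c ≠ 'm') :
    ∀ t ∈ pvTokens, ¬ [c] <+: t := by
  intro t ht; fin_cases ht <;> simp [List.cons_prefix_cons, h1, h2, h3, h4]

lemma pv_np_a (c2 : Char) (h : c2 ≠ 'y') : ∀ t ∈ pvTokens, ¬ ['a', c2] <+: t := by
  intro t ht; fin_cases ht <;> simp [List.cons_prefix_cons, h]

lemma pv_np_ay (c3 : Char) (h : c3 ≠ 'a') : ∀ t ∈ pvTokens, ¬ ['a', 'y', c3] <+: t := by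
  intro t ht; fin_cases ht <;> simp [List.cons_prefix_cons, h]

lemma pv_np_y (c2 : Char) (h : c2 ≠ 'e') : ∀ t ∈ pvTokens, ¬ ['y', c2] <+: t := by
  intro t ht; fin_cases ht <;> simp [List.cons_prefix_cons, h]

lemma pv_np_w (c2 : Char) (h : c2 ≠ 'o') : ∀ t ∈ pvTokens, ¬ ['w', c2] <+: t := by
  intro t ht; fin_cases ht <;> simp [List.cons_prefix_cons, h]

lemma pv_np_wo (c3 : Char) (h : c3 ≠ 'o') : ∀ t ∈ pvTokens, ¬ ['w', 'o', c3] <+: t := by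
  intro t ht; fin_cases ht <;> simp [List.cons_prefix_cons, h]

lemma pv_np_m (c2 : Char) (h : c2 ≠ 'a') : ∀ t ∈ pvTokens, ¬ ['m', c2] <+: t := by
  intro t ht; fin_cases ht <;> simp [List.cons_prefix_cons, h]

-- the per-string equivalence: A's char loop empties its accumulator iff B's parser accepts
lemma pv_step_nil (b : List Char) (c : Char) : pvStepA ([], b) c = ([c], b) := by
  simp [pvStepA, pvTokens]

lemma pv_main : ∀ (n : Nat) (cs : List Char), cs.length ≤ n → ∀ b : List Char,
    ((List.foldl pvStepA ([], b) cs).1 = []) ↔ pvOk cs b = true := by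
  intro n
  induction n with
  | zero =>
    intro cs hlen b
    have hcs : cs = [] := by cases cs <;> simp_all
    subst hcs
    rw [pvOk]; simp
  | succ n ih =>
    intro cs hlen b
    cases cs with
    | nil => rw [pvOk]; simp
    | cons c cs =>
      rw [pvOk]
      by_cases hca : c = 'a'
      · subst hca
        cases cs with
        | nil => simp [pvStepA, pvTokens, List.isPrefixOf]
        | cons c2 cs2 =>
          by_cases hc2 : c2 = 'y'
          · subst hc2
            have h2 : pvStepA ((['a'] : List Char), b) 'y' = (['a', 'y'], b) := by
              simp [pvStepA, pvTokens]
            cases cs2 with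
            | nil => simp [pv_step_nil, h2, List.isPrefixOf]
            | cons c3 cs3 =>
              by_cases hc3 : c3 = 'a'
              · subst hc3
                by_cases hb : (['a', 'y', 'a'] : List Char) = b
                · subst hb
                  have h3 : pvStepA ((['a', 'y'] : List Char), ['a', 'y', 'a']) 'a'
                      = (['a', 'y', 'a'], ['a', 'y', 'a']) := by
                    simp [pvStepA, pvTokens]
                  have hL := pv_blocked cs3 ['a', 'y', 'a'] (by simp [pvTokens])
                  simp [pv_step_nil, h2, h3, hL, List.isPrefixOf]
                · have h3 : pvStepA ((['a', 'y'] : List Char), b) 'a' = ([], ['a', 'y', 'a']) := by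
                    simp only [pvStepA, List.cons_append, List.nil_append]
                    rw [if_pos ⟨by simp [pvTokens], hb⟩]
                  have hbne : ((['a', 'y', 'a'] : List Char) != b) = true := by
                    simpa [bne_iff_ne] using hb
                  simp [List.foldl_cons, pv_step_nil, h2, h3, List.isPrefixOf, hbne]
                  exact ih cs3 (by simp at hlen ⊢; omega) ['a', 'y', 'a']
              · have h3 : pvStepA ((['a', 'y'] : List Char), b) c3 = (['a', 'y', c3], b) := by
                  simp only [pvStepA, List.cons_append, List.nil_append]
                  rw [if_neg]
                  rintro ⟨hm, -⟩
                  exact pv_np_ay c3 hc3 _ hm (List.prefix_refl _)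
                have hL := pv_dead cs3 ['a', 'y', c3] b (by simp) (pv_np_ay c3 hc3)
                simp [pv_step_nil, h2, h3, hL, List.isPrefixOf, Ne.symm hc3]
          · have h2 : pvStepA ((['a'] : List Char), b) c2 = (['a', c2], b) := by
              simp only [pvStepA, List.cons_append, List.nil_append]
              rw [if_neg]
              rintro ⟨hm, -⟩
              exact pv_np_a c2 hc2 _ hm (List.prefix_refl _)
            have hL := pv_dead cs2 ['a', c2] b (by simp) (pv_np_a c2 hc2)
            simp [pv_step_nil, h2, hL, List.isPrefixOf, Ne.symm hc2]
      · by_cases hcy : c = 'y'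
        · subst hcy
          cases cs with
          | nil => simp [pv_step_nil, List.isPrefixOf]
          | cons c2 cs2 =>
            by_cases hc2 : c2 = 'e'
            · subst hc2
              by_cases hb : (['y', 'e'] : List Char) = b
              · subst hb
                have h2 : pvStepA ((['y'] : List Char), ['y', 'e']) 'e' = (['y', 'e'], ['y', 'e']) := by
                  simp [pvStepA, pvTokens]
                have hL := pv_blocked cs2 ['y', 'e'] (by simp [pvTokens])
                simp [pv_step_nil, h2, hL, List.isPrefixOf]
              · have h2 : pvStepA ((['y'] : List Char), b) 'e' = ([], ['y', 'e']) := by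
                  simp only [pvStepA, List.cons_append, List.nil_append]
                  rw [if_pos ⟨by simp [pvTokens], hb⟩]
                have hbne : ((['y', 'e'] : List Char) != b) = true := by
                  simpa [bne_iff_ne] using hb
                simp [List.foldl_cons, pv_step_nil, h2, List.isPrefixOf, hbne]
                exact ih cs2 (by simp at hlen ⊢; omega) ['y', 'e']
            · have h2 : pvStepA ((['y'] : List Char), b) c2 = (['y', c2], b) := by
                simp only [pvStepA, List.cons_append, List.nil_append]
                rw [if_neg]
                rintro ⟨hm, -⟩
                exact pv_np_y c2 hc2 _ hm (List.prefix_refl _)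
              have hL := pv_dead cs2 ['y', c2] b (by simp) (pv_np_y c2 hc2)
              simp [pv_step_nil, h2, hL, List.isPrefixOf, Ne.symm hc2]
        · by_cases hcw : c = 'w'
          · subst hcw
            cases cs with
            | nil => simp [pv_step_nil, List.isPrefixOf]
            | cons c2 cs2 =>
              by_cases hc2 : c2 = 'o'
              · subst hc2
                have h2 : pvStepA ((['w'] : List Char), b) 'o' = (['w', 'o'], b) := by
                  simp [pvStepA, pvTokens]
                cases cs2 with
                | nil => simp [pv_step_nil, h2, List.isPrefixOf]
                | cons c3 cs3 =>
                  by_cases hc3 : c3 = 'o'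
                  · subst hc3
                    by_cases hb : (['w', 'o', 'o'] : List Char) = b
                    · subst hb
                      have h3 : pvStepA ((['w', 'o'] : List Char), ['w', 'o', 'o']) 'o'
                          = (['w', 'o', 'o'], ['w', 'o', 'o']) := by
                        simp [pvStepA, pvTokens]
                      have hL := pv_blocked cs3 ['w', 'o', 'o'] (by simp [pvTokens])
                      simp [pv_step_nil, h2, h3, hL, List.isPrefixOf]
                    · have h3 : pvStepA ((['w', 'o'] : List Char), b) 'o' = ([], ['w', 'o', 'o']) := by
                        simp only [pvStepA, List.cons_append, List.nil_append]
                        rw [if_pos ⟨by simp [pvTokens], hb⟩]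
                      have hbne : ((['w', 'o', 'o'] : List Char) != b) = true := by
                        simpa [bne_iff_ne] using hb
                      simp [List.foldl_cons, pv_step_nil, h2, h3, List.isPrefixOf, hbne]
                      exact ih cs3 (by simp at hlen ⊢; omega) ['w', 'o', 'o']
                  · have h3 : pvStepA ((['w', 'o'] : List Char), b) c3 = (['w', 'o', c3], b) := by
                      simp only [pvStepA, List.cons_append, List.nil_append]
                      rw [if_neg]
                      rintro ⟨hm, -⟩
                      exact pv_np_wo c3 hc3 _ hm (List.prefix_refl _)
                    have hL := pv_dead cs3 ['w', 'o', c3] b (by simp) (pv_np_wo c3 hc3)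
                    simp [pv_step_nil, h2, h3, hL, List.isPrefixOf, Ne.symm hc3]
              · have h2 : pvStepA ((['w'] : List Char), b) c2 = (['w', c2], b) := by
                  simp only [pvStepA, List.cons_append, List.nil_append]
                  rw [if_neg]
                  rintro ⟨hm, -⟩
                  exact pv_np_w c2 hc2 _ hm (List.prefix_refl _)
                have hL := pv_dead cs2 ['w', c2] b (by simp) (pv_np_w c2 hc2)
                simp [pv_step_nil, h2, hL, List.isPrefixOf, Ne.symm hc2]
          · by_cases hcm : c = 'm'
            · subst hcm
              cases cs with
              | nil => simp [pv_step_nil, List.isPrefixOf]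
              | cons c2 cs2 =>
                by_cases hc2 : c2 = 'a'
                · subst hc2
                  by_cases hb : (['m', 'a'] : List Char) = b
                  · subst hb
                    have h2 : pvStepA ((['m'] : List Char), ['m', 'a']) 'a' = (['m', 'a'], ['m', 'a']) := by
                      simp [pvStepA, pvTokens]
                    have hL := pv_blocked cs2 ['m', 'a'] (by simp [pvTokens])
                    simp [pv_step_nil, h2, hL, List.isPrefixOf]
                  · have h2 : pvStepA ((['m'] : List Char), b) 'a' = ([], ['m', 'a']) := by
                      simp only [pvStepA, List.cons_append, List.nil_append]
                      rw [if_pos ⟨by simp [pvTokens], hb⟩]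
                    have hbne : ((['m', 'a'] : List Char) != b) = true := by
                      simpa [bne_iff_ne] using hb
                    simp [List.foldl_cons, pv_step_nil, h2, List.isPrefixOf, hbne]
                    exact ih cs2 (by simp at hlen ⊢; omega) ['m', 'a']
                · have h2 : pvStepA ((['m'] : List Char), b) c2 = (['m', c2], b) := by
                    simp only [pvStepA, List.cons_append, List.nil_append]
                    rw [if_neg]
                    rintro ⟨hm, -⟩
                    exact pv_np_m c2 hc2 _ hm (List.prefix_refl _)
                  have hL := pv_dead cs2 ['m', c2] b (by simp) (pv_np_m c2 hc2)
                  simp [pv_step_nil, h2, hL, List.isPrefixOf, Ne.symm hc2]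
            · have hL := pv_dead cs [c] b (by simp) (pv_np1 c hca hcy hcw hcm)
              simp [pv_step_nil, hL, List.isPrefixOf, Ne.symm hca, Ne.symm hcy, Ne.symm hcw,
                Ne.symm hcm]

lemma pv_count : ∀ (l : List String) (acc : Int),
    l.foldl (fun answer i =>
        let st := i.toList.foldl pvStepA ([], [])
        if st.1.length = 0 then answer + 1 else answer) acc
      = acc + (l.map (fun s => if pvOk s.toList [] then (1 : Int) else 0)).sum := by
  intro l
  induction l with
  | nil => simp
  | cons s l ih =>
    intro acc
    have hiff := pv_main s.toList.length s.toList le_rfl []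
    by_cases h : pvOk s.toList [] = true
    · have : (s.toList.foldl pvStepA ([], [])).1.length = 0 := by
        simp [hiff.mpr h]
      simp only [List.foldl_cons, List.map_cons, List.sum_cons, this, ih, h]
      simp
      ring
    · have hne : (s.toList.foldl pvStepA ([], [])).1 ≠ [] := fun he => h (hiff.mp he)
      have : ¬ (s.toList.foldl pvStepA ([], [])).1.length = 0 := by
        simpa [List.length_eq_zero_iff] using hne
      simp only [List.foldl_cons, List.map_cons, List.sum_cons, this, h, ih]
      simp

-- ===== VERDICT (by name: the statement is the Claim_ definition above) =====
theorem solution_spec : Claim_equal_solution := by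
  intro babbling _
  unfold Spec_solution solution solution_alt
  simpa using pv_count babbling 0
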